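-- pv_equiv track=rewrite | github.com/DSMishler/ParSEC_Animate_Demo | parsec_animation_utils.py | sequential_order_generator
-- ===== SOURCE A (Python) =====
-- def sequential_order_generator(Ntiles_m, Ntiles_n, Ntiles_k, square_size = 6):
--     i = 0 # parsing through m
--     j = 0 # parsing through n
--     k = 0
--     ordered_list = []
--     while(i < Ntiles_m):
--         j = 0
--         while(j < Ntiles_n):
--             k = 0
--             while(k < Ntiles_k):
--                 ordered_list.append([i,j,k])
--                 k += 1
--             j += 1
--         i += 1
--
--     return ordered_list
-- ===== SOURCE B (Python) =====
-- def sequential_order_generator(Ntiles_m, Ntiles_n, Ntiles_k, square_size=6):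
--     if Ntiles_m <= 0 or Ntiles_n <= 0 or Ntiles_k <= 0:
--         return []
--     nk = Ntiles_n * Ntiles_k
--     total = Ntiles_m * nk
--     return [[idx // nk, (idx // Ntiles_k) % Ntiles_n, idx % Ntiles_k]
--             for idx in range(total)]
-- ===== Notes on version B (the rewrite author's own statement) =====
-- stated objective: alternative
-- what changed: Replaced the three nested while-loop counters by one flat pass over range(m*n*k) that recovers each [i,j,k] triple with floor-division/modulo index arithmetic (guarded by an explicit empty result when any count is nonpositive).
import Mathlib
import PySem

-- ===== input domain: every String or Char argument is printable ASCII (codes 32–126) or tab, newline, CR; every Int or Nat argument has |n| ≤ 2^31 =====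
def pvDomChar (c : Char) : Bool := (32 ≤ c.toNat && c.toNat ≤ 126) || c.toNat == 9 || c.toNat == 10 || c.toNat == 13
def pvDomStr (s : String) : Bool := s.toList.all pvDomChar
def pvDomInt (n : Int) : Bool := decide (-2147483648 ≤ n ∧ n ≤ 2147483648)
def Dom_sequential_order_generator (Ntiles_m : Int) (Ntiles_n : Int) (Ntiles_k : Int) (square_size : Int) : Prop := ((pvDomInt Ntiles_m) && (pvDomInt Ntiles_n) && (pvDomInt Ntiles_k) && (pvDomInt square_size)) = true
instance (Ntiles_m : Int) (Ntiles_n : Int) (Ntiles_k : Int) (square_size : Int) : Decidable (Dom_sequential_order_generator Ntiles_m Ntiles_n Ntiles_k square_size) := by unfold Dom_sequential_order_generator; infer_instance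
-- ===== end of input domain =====

-- B replaces A's three nested while-loop counters by one flat pass over range(m*n*k)
-- recovering each [i,j,k] by floor-division/modulo index arithmetic; same return value.

-- ===== PORT A =====
-- inner while(k < Ntiles_k) loop: appends [i,j,k] and increments k
def sogLoopK (i j Ntiles_k k : Int) (acc : List (List Int)) : List (List Int) :=
  if k < Ntiles_k then sogLoopK i j Ntiles_k (k + 1) (acc ++ [[i, j, k]]) else acc
  termination_by (Ntiles_k - k).toNat
  decreasing_by omega

-- middle while(j < Ntiles_n) loop: resets k to 0, runs the inner loop, increments j
def sogLoopJ (i Ntiles_n Ntiles_k j : Int) (acc : List (List Int)) : List (List Int) :=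
  if j < Ntiles_n then sogLoopJ i Ntiles_n Ntiles_k (j + 1) (sogLoopK i j Ntiles_k 0 acc) else acc
  termination_by (Ntiles_n - j).toNat
  decreasing_by omega

-- outer while(i < Ntiles_m) loop
def sogLoopI (Ntiles_m Ntiles_n Ntiles_k i : Int) (acc : List (List Int)) : List (List Int) :=
  if i < Ntiles_m then sogLoopI Ntiles_m Ntiles_n Ntiles_k (i + 1) (sogLoopJ i Ntiles_n Ntiles_k 0 acc) else acc
  termination_by (Ntiles_m - i).toNat
  decreasing_by omega

def sequential_order_generator (Ntiles_m : Int) (Ntiles_n : Int) (Ntiles_k : Int) (square_size : Int) : List (List Int) :=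
  sogLoopI Ntiles_m Ntiles_n Ntiles_k 0 []

-- ===== PORT B =====
def sequential_order_generator_alt (Ntiles_m : Int) (Ntiles_n : Int) (Ntiles_k : Int) (square_size : Int) : List (List Int) :=
  if Ntiles_m ≤ 0 ∨ Ntiles_n ≤ 0 ∨ Ntiles_k ≤ 0 then []
  else
    let nk := Ntiles_n * Ntiles_k
    let total := Ntiles_m * nk
    (PySem.List.pyRange 0 total 1).map (fun idx =>
      [PySem.Int.floordiv idx nk,
       PySem.Int.mod (PySem.Int.floordiv idx Ntiles_k) Ntiles_n,
       PySem.Int.mod idx Ntiles_k])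

-- ===== PRECONDITION & SPEC =====
def Spec_sequential_order_generator (Ntiles_m : Int) (Ntiles_n : Int) (Ntiles_k : Int) (square_size : Int) (out : List (List Int)) : Prop := out = sequential_order_generator_alt Ntiles_m Ntiles_n Ntiles_k square_size
instance (Ntiles_m : Int) (Ntiles_n : Int) (Ntiles_k : Int) (square_size : Int) (out : List (List Int)) : Decidable (Spec_sequential_order_generator Ntiles_m Ntiles_n Ntiles_k square_size out) := by unfold Spec_sequential_order_generator; infer_instance

-- ===== CLAIM (what is proved, stated in full; the proofs are below) =====
def Claim_equal_sequential_order_generator : Prop := ∀ (Ntiles_m : Int) (Ntiles_n : Int) (Ntiles_k : Int) (square_size : Int), Dom_sequential_order_generator Ntiles_m Ntiles_n Ntiles_k square_size → Spec_sequential_order_generator Ntiles_m Ntiles_n Ntiles_k square_size (sequential_order_generator Ntiles_m Ntiles_n Ntiles_k square_size)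

-- ===== LEMMAS AND PROOFS =====

-- characterization of the inner loop
theorem sogLoopK_eq (d : Nat) : ∀ (i j K k : Int) (acc : List (List Int)), (K - k).toNat = d →
    sogLoopK i j K k acc = acc ++ (List.range d).map (fun (t : Nat) => [i, j, k + (t : Int)]) := by
  induction d with
  | zero =>
    intro i j K k acc hd
    rw [sogLoopK]
    have h : ¬ k < K := by omega
    simp [h]
  | succ d ih =>
    intro i j K k acc hd
    have h : k < K := by omega
    rw [sogLoopK]
    simp only [h, if_pos]
    rw [ih i j K (k + 1) _ (by omega)]
    rw [List.range_succ_eq_map, List.map_cons, List.map_map, List.append_assoc,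
        List.cons_append, List.nil_append]
    congr 2
    · simp
    · apply List.map_congr_left
      intro t _
      simp only [Function.comp_def, List.cons.injEq, and_true, true_and]
      push_cast
      ring

-- characterization of the middle loop
theorem sogLoopJ_eq (d : Nat) : ∀ (i N K j : Int) (acc : List (List Int)), (N - j).toNat = d →
    sogLoopJ i N K j acc = acc ++ (List.range d).flatMap (fun (t : Nat) =>
      (List.range K.toNat).map (fun (kk : Nat) => [i, j + (t : Int), (kk : Int)])) := by
  induction d with
  | zero =>
    intro i N K j acc hd
    rw [sogLoopJ]
    have h : ¬ j < N := by omega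
    simp [h]
  | succ d ih =>
    intro i N K j acc hd
    have h : j < N := by omega
    rw [sogLoopJ]
    simp only [h, if_pos]
    rw [ih i N K (j + 1) _ (by omega)]
    rw [sogLoopK_eq K.toNat i j K 0 acc (by omega)]
    rw [List.range_succ_eq_map, List.flatMap_cons, List.flatMap_map, List.append_assoc]
    congr 1
    congr 1
    · apply List.map_congr_left
      intro kk _
      simp
    · apply List.flatMap_congr
      intro t _
      apply List.map_congr_left
      intro kk _
      simp only [Function.comp_def, List.cons.injEq, and_true, true_and]
      push_cast
      ring

-- characterization of the outer loop
theorem sogLoopI_eq (d : Nat) : ∀ (M N K i : Int) (acc : List (List Int)), (M - i).toNat = d →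
    sogLoopI M N K i acc = acc ++ (List.range d).flatMap (fun (t : Nat) =>
      (List.range N.toNat).flatMap (fun (j : Nat) =>
        (List.range K.toNat).map (fun (kk : Nat) => [i + (t : Int), (j : Int), (kk : Int)]))) := by
  induction d with
  | zero =>
    intro M N K i acc hd
    rw [sogLoopI]
    have h : ¬ i < M := by omega
    simp [h]
  | succ d ih =>
    intro M N K i acc hd
    have h : i < M := by omega
    rw [sogLoopI]
    simp only [h, if_pos]
    rw [ih M N K (i + 1) _ (by omega)]
    rw [sogLoopJ_eq N.toNat i N K 0 acc (by omega)]
    rw [List.range_succ_eq_map, List.flatMap_cons, List.flatMap_map, List.append_assoc]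
    congr 1
    congr 1
    · apply List.flatMap_congr
      intro j _
      apply List.map_congr_left
      intro kk _
      simp
    · apply List.flatMap_congr
      intro t _
      apply List.flatMap_congr
      intro j _
      apply List.map_congr_left
      intro kk _
      simp only [Function.comp_def, List.cons.injEq, and_true, true_and]
      push_cast
      ring

-- A as a triple flatMap over Nat ranges
theorem portA_eq (M N K sq : Int) :
    sequential_order_generator M N K sq = (List.range M.toNat).flatMap (fun (i : Nat) =>
      (List.range N.toNat).flatMap (fun (j : Nat) =>
        (List.range K.toNat).map (fun (kk : Nat) => ([(i : Int), (j : Int), (kk : Int)] : List Int)))) := by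
  unfold sequential_order_generator
  rw [sogLoopI_eq M.toNat M N K 0 [] (by omega)]
  simp

-- key index-arithmetic lemma: one flat range of m blocks of size q, decoded by / and %
theorem map_range_mul_div_mod (g : Nat → Nat → List Int) (q : Nat) (hq : 0 < q) (m : Nat) :
    (List.range (m * q)).map (fun r => g (r / q) (r % q))
      = (List.range m).flatMap (fun i => (List.range q).map (g i)) := by
  induction m with
  | zero => simp
  | succ m ih =>
    have h1 : (m + 1) * q = m * q + q := by ring
    rw [h1, List.range_add, List.map_append, ih, List.range_succ, List.flatMap_append]
    congr 1
    rw [List.map_map]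
    simp only [List.flatMap_cons, List.flatMap_nil, List.append_nil]
    apply List.map_congr_left
    intro s hs
    have hs' : s < q := List.mem_range.mp hs
    have e1 : (m * q + s) / q = m := by
      rw [Nat.add_comm, Nat.add_mul_div_right _ _ hq, Nat.div_eq_of_lt hs', Nat.zero_add]
    have e2 : (m * q + s) % q = s := by
      rw [Nat.add_comm, Nat.add_mul_mod_self_right, Nat.mod_eq_of_lt hs']
    simp only [Function.comp_def, e1, e2]

-- the Nat-level equality between B's flat decode and the triple flatMap
theorem flat_decode_eq (M N K : Nat) (hN : 0 < N) (hK : 0 < K) :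
    (List.range (M * (N * K))).map (fun (t : Nat) =>
        ([((t / (N * K) : Nat) : Int), ((t / K % N : Nat) : Int), ((t % K : Nat) : Int)] : List Int))
      = (List.range M).flatMap (fun (i : Nat) =>
          (List.range N).flatMap (fun (j : Nat) =>
            (List.range K).map (fun (kk : Nat) => ([(i : Int), (j : Int), (kk : Int)] : List Int)))) := by
  have hq : 0 < N * K := Nat.mul_pos hN hK
  have step1 : (List.range (M * (N * K))).map (fun (t : Nat) =>
        ([((t / (N * K) : Nat) : Int), ((t / K % N : Nat) : Int), ((t % K : Nat) : Int)] : List Int))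
      = (List.range (M * (N * K))).map (fun (t : Nat) =>
        ([((t / (N * K) : Nat) : Int), ((t % (N * K) / K : Nat) : Int), ((t % (N * K) % K : Nat) : Int)] : List Int)) := by
    apply List.map_congr_left
    intro t _
    have h2 : t % (N * K) / K = t / K % N := by
      rw [mul_comm N K]; exact Nat.mod_mul_right_div_self t K N
    have h3 : t % (N * K) % K = t % K := Nat.mod_mod_of_dvd t ⟨N, mul_comm N K⟩
    rw [h2, h3]
  have step2 := map_range_mul_div_mod
    (fun i r => ([((i : Nat) : Int), ((r / K : Nat) : Int), ((r % K : Nat) : Int)] : List Int)) (N * K) hq M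
  have inner : (fun i : Nat => (List.range (N * K)).map (fun (r : Nat) =>
        ([((i : Nat) : Int), ((r / K : Nat) : Int), ((r % K : Nat) : Int)] : List Int)))
      = (fun i : Nat => (List.range N).flatMap (fun (j : Nat) =>
          (List.range K).map (fun (kk : Nat) => ([(i : Int), (j : Int), (kk : Int)] : List Int)))) := by
    funext i
    exact map_range_mul_div_mod
      (fun j kk => ([((i : Nat) : Int), ((j : Nat) : Int), ((kk : Nat) : Int)] : List Int)) K hK N
  exact step1.trans (step2.trans (congrArg (List.flatMap · (List.range M)) inner))

-- ===== VERDICT (by name: the statement is the Claim_ definition above) =====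
theorem sequential_order_generator_spec : Claim_equal_sequential_order_generator := by
  intro M N K sq _
  unfold Spec_sequential_order_generator sequential_order_generator_alt
  by_cases hg : M ≤ 0 ∨ N ≤ 0 ∨ K ≤ 0
  · rw [if_pos hg, portA_eq]
    rcases hg with h | h | h
    · have hz : M.toNat = 0 := by omega
      simp [hz]
    · have hz : N.toNat = 0 := by omega
      simp [hz]
    · have hz : K.toNat = 0 := by omega
      simp [hz]
  · push_neg at hg
    obtain ⟨hM, hN, hK⟩ := hg
    obtain ⟨Mn, rfl⟩ : ∃ n : Nat, M = (n : Int) := ⟨M.toNat, by omega⟩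
    obtain ⟨Nn, rfl⟩ : ∃ n : Nat, N = (n : Int) := ⟨N.toNat, by omega⟩
    obtain ⟨Kn, rfl⟩ : ∃ n : Nat, K = (n : Int) := ⟨K.toNat, by omega⟩
    rw [if_neg (by omega : ¬ ((Mn : Int) ≤ 0 ∨ (Nn : Int) ≤ 0 ∨ (Kn : Int) ≤ 0)), portA_eq]
    show _ = (PySem.List.pyRange 0 ((Mn : Int) * ((Nn : Int) * (Kn : Int))) 1).map (fun idx =>
      [PySem.Int.floordiv idx ((Nn : Int) * (Kn : Int)),
       PySem.Int.mod (PySem.Int.floordiv idx (Kn : Int)) (Nn : Int),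
       PySem.Int.mod idx (Kn : Int)])
    rw [PySem.List.pyRange_one]
    simp only [Int.toNat_natCast]
    rw [show ((Mn : Int) * ((Nn : Int) * (Kn : Int)) - 0).toNat = Mn * (Nn * Kn) from by
      rw [sub_zero, ← Nat.cast_mul, ← Nat.cast_mul, Int.toNat_natCast]]
    rw [List.map_map, ← flat_decode_eq Mn Nn Kn (by omega) (by omega)]
    apply List.map_congr_left
    intro t _
    simp only [Function.comp_def, zero_add]
    have e1 : PySem.Int.floordiv (t : Int) ((Nn : Int) * (Kn : Int)) = ((t / (Nn * Kn) : Nat) : Int) := by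
      rw [← Nat.cast_mul]; exact PySem.Int.floordiv_natCast t (Nn * Kn)
    have e2 : PySem.Int.floordiv (t : Int) (Kn : Int) = ((t / Kn : Nat) : Int) :=
      PySem.Int.floordiv_natCast t Kn
    have e4 : PySem.Int.mod (t : Int) (Kn : Int) = ((t % Kn : Nat) : Int) :=
      PySem.Int.mod_natCast t Kn
    rw [e1, e2, e4, PySem.Int.mod_natCast]
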